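-- pv_equiv track=rewrite | github.com/SeokcheonMoon/Coding_test | 프로그래머스/Python/120884. 치킨 쿠폰/치킨 쿠폰.py | solution
-- ===== SOURCE A (Python) =====
-- def solution(chicken):
--     str_chicken = str(chicken)
--
--     list_answer = []
--     list_plus = []
--     value = chicken // 10
--     plus = chicken % 10
--
--     for x in range(len(str_chicken)):
--         list_answer.append(value)
--         list_plus.append(plus)
--         plus = value % 10
--         value = value // 10
--
--     answer = sum(list_answer) + sum(list_plus)//10
--     if sum(list_plus) // 10 + sum(list_plus) % 10 >= 10:
--         answer = answer + 1
--     return answer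
-- ===== SOURCE B (Python) =====
-- def solution(chicken):
--     # closed form: every 10 coupons yield a bonus chicken whose coupon feeds back
--     return 0 if chicken == 0 else (chicken - 1) // 9
-- ===== Notes on version B (the rewrite author's own statement) =====
-- stated objective: simpler
-- what changed: The digit-by-digit loop over str(chicken) with two accumulated lists and a carry correction is replaced by a single closed-form floor division of chicken-1 by nine, with a guard for zero chicken.
-- outside the precondition, e.g. on solution(-1998): A returns -222, B returns -223
import Mathlib
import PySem

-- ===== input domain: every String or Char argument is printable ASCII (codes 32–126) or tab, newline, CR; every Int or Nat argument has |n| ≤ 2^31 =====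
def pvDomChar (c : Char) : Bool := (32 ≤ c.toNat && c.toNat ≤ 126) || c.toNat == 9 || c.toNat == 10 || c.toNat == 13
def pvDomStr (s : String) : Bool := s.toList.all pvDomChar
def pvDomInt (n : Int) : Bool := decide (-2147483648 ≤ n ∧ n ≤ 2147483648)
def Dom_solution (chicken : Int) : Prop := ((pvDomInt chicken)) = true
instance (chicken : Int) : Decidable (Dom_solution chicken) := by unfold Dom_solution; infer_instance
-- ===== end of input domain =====

-- B replaces A's digit-loop over str(chicken) by a closed-form floor division of chicken-1 by nine (zero for zero chicken);
-- Pre_ restricts to nonnegative coupon counts (the task's natural domain; A returns values on negatives too).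


-- ===== PORT A =====
-- one loop step: append value / plus, then plus = value % 10; value = value // 10
def solStep (st : List Int × List Int × Int × Int) (_ : Int) : List Int × List Int × Int × Int :=
  (st.1 ++ [st.2.2.1], st.2.1 ++ [st.2.2.2], PySem.Int.floordiv st.2.2.1 10, PySem.Int.mod st.2.2.1 10)

def solution (chicken : Int) : Int :=
  let strChicken := PySem.Int.toChars chicken
  let value := PySem.Int.floordiv chicken 10
  let plus := PySem.Int.mod chicken 10
  let st := (PySem.List.pyRange 0 (strChicken.length : Int) 1).foldl solStep
      (([] : List Int), ([] : List Int), value, plus)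
  let answer := st.1.sum + PySem.Int.floordiv st.2.1.sum 10
  if PySem.Int.floordiv st.2.1.sum 10 + PySem.Int.mod st.2.1.sum 10 ≥ 10 then answer + 1 else answer

-- ===== PORT B =====
def solution_alt (chicken : Int) : Int :=
  if chicken = 0 then 0 else PySem.Int.floordiv (chicken - 1) 9

-- ===== PRECONDITION & SPEC =====
-- Pre_ excludes negative coupon counts: outside the task's natural domain (A still returns values there,
-- following the sign conventions of Python's floor division on the '-'-prefixed string length).
def Pre_solution (chicken : Int) : Prop := 0 ≤ chicken
instance (chicken : Int) : Decidable (Pre_solution chicken) := by unfold Pre_solution; infer_instance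
def pvWitness_solution : Int := 38

def Spec_solution (chicken : Int) (out : Int) : Prop := out = solution_alt chicken
instance (chicken : Int) (out : Int) : Decidable (Spec_solution chicken out) := by unfold Spec_solution; infer_instance

-- ===== CLAIM (what is proved, stated in full; the proofs are below) =====
def Claim_equal_solution : Prop := ∀ (chicken : Int), Dom_solution chicken → Pre_solution chicken → Spec_solution chicken (solution chicken)

-- ===== LEMMAS AND PROOFS =====

-- the two lists A builds after n iterations, as functions of chicken
def listAns (c : Int) : Nat → List Int
  | 0 => []
  | n+1 => listAns c n ++ [c / 10 ^ (n+1)]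

def listPlus (c : Int) : Nat → List Int
  | 0 => []
  | n+1 => listPlus c n ++ [(c / 10 ^ n) % 10]

lemma ediv_pow_succ (c : Int) (n : Nat) : c / 10 ^ (n+1) = (c / 10 ^ n) / 10 := by
  rw [pow_succ]
  exact (Int.ediv_ediv_of_nonneg (by positivity)).symm

lemma loop_inv (c : Int) (n : Nat) :
    (PySem.List.pyRange 0 (n : Int) 1).foldl solStep
      (([] : List Int), ([] : List Int), PySem.Int.floordiv c 10, PySem.Int.mod c 10)
    = (listAns c n, listPlus c n, c / 10 ^ (n+1), (c / 10 ^ n) % 10) := by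
  induction n with
  | zero =>
      simp [PySem.List.pyRange, listAns, listPlus]
  | succ n ih =>
      have h : PySem.List.pyRange 0 ((n : Int) + 1) 1 = PySem.List.pyRange 0 (n : Int) 1 ++ [(n : Int)] :=
        PySem.List.pyRange_one_succ_right (by exact_mod_cast Int.natCast_nonneg n)
      push_cast
      rw [h, List.foldl_append, ih]
      simp only [List.foldl_cons, List.foldl_nil, solStep]
      rw [PySem.Int.floordiv_eq_ediv_of_pos (show (0:Int) < 10 by norm_num),
          PySem.Int.mod_eq_emod_of_pos (show (0:Int) < 10 by norm_num),
          ← ediv_pow_succ c (n+1)]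
      simp [listAns, listPlus]

lemma sums_inv (c : Int) (n : Nat) :
    9 * (listAns c n).sum + (listPlus c n).sum = c - c / 10 ^ n := by
  induction n with
  | zero => simp [listAns, listPlus]
  | succ n ih =>
      have h := ediv_pow_succ c n
      simp only [listAns, listPlus, List.sum_append, List.sum_cons, List.sum_nil]
      generalize hq : c / 10 ^ n = q at ih h ⊢
      generalize c / 10 ^ (n+1) = q' at ih h ⊢
      omega

lemma plus_nonneg (c : Int) (n : Nat) : 0 ≤ (listPlus c n).sum := by
  induction n with
  | zero => simp [listPlus]
  | succ n ih =>
      simp only [listPlus, List.sum_append, List.sum_cons, List.sum_nil]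
      have : 0 ≤ (c / 10 ^ n) % 10 := Int.emod_nonneg _ (by norm_num)
      omega

lemma plus_le (c : Int) (n : Nat) : (listPlus c n).sum ≤ 9 * n := by
  induction n with
  | zero => simp [listPlus]
  | succ n ih =>
      simp only [listPlus, List.sum_append, List.sum_cons, List.sum_nil]
      have : (c / 10 ^ n) % 10 < 10 := Int.emod_lt_of_pos _ (by norm_num)
      have h0 : 0 ≤ (c / 10 ^ n) % 10 := Int.emod_nonneg _ (by norm_num)
      push_cast
      omega

lemma plus_pos (c : Int) : ∀ n : Nat, 1 ≤ c → c < 10 ^ n → 1 ≤ (listPlus c n).sum := by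
  intro n
  induction n with
  | zero => intro h1 h2; simp at h2; omega
  | succ n ih =>
      intro h1 h2
      simp only [listPlus, List.sum_append, List.sum_cons, List.sum_nil]
      by_cases hlt : c < 10 ^ n
      · have := ih h1 hlt
        have : 0 ≤ (c / 10 ^ n) % 10 := Int.emod_nonneg _ (by norm_num)
        omega
      · rw [not_lt] at hlt
        have hq1 : 1 ≤ c / 10 ^ n := by
          rw [Int.le_ediv_iff_mul_le (by positivity)]; omega
        have hq2 : c / 10 ^ n < 10 := by
          rw [Int.ediv_lt_iff_lt_mul (by positivity)]
          calc c < 10 ^ (n+1) := h2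
            _ = 10 * 10 ^ n := by ring
        have := plus_nonneg c n
        have hmod : (c / 10 ^ n) % 10 = c / 10 ^ n := by omega
        omega

lemma listAns_zero_sum (n : Nat) : (listAns 0 n).sum = 0 := by
  induction n with
  | zero => simp [listAns]
  | succ n ih => simp [listAns, ih]

lemma listPlus_zero_sum (n : Nat) : (listPlus 0 n).sum = 0 := by
  induction n with
  | zero => simp [listPlus]
  | succ n ih => simp [listPlus, ih]

-- length of str(c): c < 10 ^ length, via toDigitsCore
lemma toDigitsCore_lb : ∀ (f n : Nat) (l : List Char), n < f →
    n < 10 ^ ((Nat.toDigitsCore 10 f n l).length - l.length) := by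
  intro f
  induction f with
  | zero => intro n l h; omega
  | succ f ih =>
      intro n l h
      simp only [Nat.toDigitsCore]
      by_cases hz : n / 10 = 0
      · simp only [hz]
        have : n < 10 := by omega
        simpa using this
      · rw [if_neg hz]
        have hrec := ih (n / 10) ((n % 10).digitChar :: l) (by omega)
        set L := (Nat.toDigitsCore 10 f (n / 10) ((n % 10).digitChar :: l)).length with hL
        simp only [List.length_cons] at hrec
        by_cases hk : L ≤ l.length + 1
        · have : L - (l.length + 1) = 0 := by omega
          rw [this] at hrec
          simp at hrec
          omega
        · rw [not_le] at hk
          have harith : L - l.length = (L - (l.length + 1)) + 1 := by omega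
          rw [harith, pow_succ]
          have : n < 10 * 10 ^ (L - (l.length + 1)) := by omega
          linarith [this]

lemma toChars_lb (c : Int) (hc : 0 ≤ c) : c < 10 ^ (PySem.Int.toChars c).length := by
  have h1 : PySem.Int.toChars c = Nat.toDigits 10 c.toNat := by
    simp [PySem.Int.toChars, Int.not_lt.mpr hc]
  have h2 := toDigitsCore_lb (c.toNat + 1) c.toNat [] (by omega)
  simp only [List.length_nil, Nat.sub_zero] at h2
  rw [h1]
  unfold Nat.toDigits
  have : (c : Int) = (c.toNat : Int) := by omega
  rw [this]
  exact_mod_cast h2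

lemma toChars_ub (c : Int) (hc : 0 ≤ c) (hb : c ≤ 2147483648) :
    (PySem.Int.toChars c).length ≤ 10 := by
  have h1 : PySem.Int.toChars c = Nat.toDigits 10 c.toNat := by
    simp [PySem.Int.toChars, Int.not_lt.mpr hc]
  rw [h1]
  exact Nat.toDigits_length 10 c.toNat 10 (by norm_num) (by omega)

-- ===== VERDICT (by name: the statement is the Claim_ definition above) =====
theorem solution_spec : Claim_equal_solution := by
  intro c hdom hpre
  unfold Spec_solution solution solution_alt
  simp only [loop_inv]
  have hc : 0 ≤ c := hpre
  have hb : c ≤ 2147483648 := by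
    unfold Dom_solution pvDomInt at hdom
    simpa using (of_decide_eq_true hdom).2
  set n := (PySem.Int.toChars c).length with hn
  have hlb : c < 10 ^ n := toChars_lb c hc
  have hub : n ≤ 10 := toChars_ub c hc hb
  have hz : c / 10 ^ n = 0 := Int.ediv_eq_zero_of_lt hc hlb
  have hsum := sums_inv c n
  rw [hz] at hsum
  have hPnn := plus_nonneg c n
  have hPle := plus_le c n
  rw [PySem.Int.floordiv_eq_ediv_of_pos (show (0:Int) < 10 by norm_num),
      PySem.Int.mod_eq_emod_of_pos (show (0:Int) < 10 by norm_num),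
      PySem.Int.floordiv_eq_ediv_of_pos (show (0:Int) < 9 by norm_num)]
  by_cases h0 : c = 0
  · rw [if_pos h0]
    subst h0
    rw [listAns_zero_sum, listPlus_zero_sum]
    norm_num
  · have hc1 : 1 ≤ c := by omega
    have hP1 : 1 ≤ (listPlus c n).sum := plus_pos c n hc1 hlb
    rw [if_neg h0]
    generalize (listAns c n).sum = sA at hsum
    generalize (listPlus c n).sum = sP at hsum hPnn hPle hP1
    have hn90 : sP ≤ 90 := by omega
    split_ifs with hcond <;> omega
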